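-- pv_equiv track=rewrite | github.com/Jakub-Karczewski/WDI | tests/2024/2025/taskA/method1.py | calculate_decimal
-- ===== SOURCE A (Python) =====
-- def calculate_decimal(tab:list[int], k:int) -> int:
--     dl = len(tab)
--     res = 0
--     pow = 1
--     for i in range(dl-1, -1, -1):
--         res += tab[i] * pow
--         pow *= k
--     return res
-- ===== SOURCE B (Python) =====
-- def calculate_decimal(tab: list[int], k: int) -> int:
--     res = 0
--     for d in tab:
--         res = res * k + d
--     return res
-- ===== Notes on version B (the rewrite author's own statement) =====
-- stated objective: idiomatic
-- what changed: Replaced the reverse index loop maintaining an explicit power-of-k accumulator with Horner's method: a single forward pass over the digits with one running accumulator res = res*k + d.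
import Mathlib
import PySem

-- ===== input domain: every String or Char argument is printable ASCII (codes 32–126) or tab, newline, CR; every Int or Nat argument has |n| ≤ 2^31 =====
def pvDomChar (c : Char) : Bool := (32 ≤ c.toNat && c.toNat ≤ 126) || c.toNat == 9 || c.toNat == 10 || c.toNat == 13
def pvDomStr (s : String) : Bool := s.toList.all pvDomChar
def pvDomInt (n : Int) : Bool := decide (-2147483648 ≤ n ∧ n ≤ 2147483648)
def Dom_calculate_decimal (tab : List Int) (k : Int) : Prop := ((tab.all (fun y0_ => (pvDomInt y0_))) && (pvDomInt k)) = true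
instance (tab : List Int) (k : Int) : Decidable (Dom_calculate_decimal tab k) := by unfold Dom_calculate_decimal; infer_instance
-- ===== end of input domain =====

-- B replaces A's reverse index loop with an explicit power accumulator by Horner's
-- method: one forward pass, res = res*k + d (idiomatic; same return value).

-- ===== PORT A =====
-- literal port: dl = len(tab); res = 0; pow = 1; for i in range(dl-1,-1,-1): res += tab[i]*pow; pow *= k
def calculate_decimal (tab : List Int) (k : Int) : Int :=
  let dl : Int := tab.length
  let s := (PySem.List.pyRange (dl - 1) (-1) (-1)).foldl
    (fun (s : Int × Int) i => (s.1 + (PySem.List.pyGetD tab i 0) * s.2, s.2 * k)) (0, 1)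
  s.1

-- ===== PORT B =====
-- Horner's method: res = 0; for d in tab: res = res*k + d
def calculate_decimal_alt (tab : List Int) (k : Int) : Int :=
  tab.foldl (fun res d => res * k + d) 0

-- ===== PRECONDITION & SPEC =====
def Spec_calculate_decimal (tab : List Int) (k : Int) (out : Int) : Prop := out = calculate_decimal_alt tab k
instance (tab : List Int) (k : Int) (out : Int) : Decidable (Spec_calculate_decimal tab k out) := by unfold Spec_calculate_decimal; infer_instance

-- ===== CLAIM (what is proved, stated in full; the proofs are below) =====
def Claim_equal_calculate_decimal : Prop := ∀ (tab : List Int) (k : Int), Dom_calculate_decimal tab k → Spec_calculate_decimal tab k (calculate_decimal tab k)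

-- ===== LEMMAS AND PROOFS =====

-- foldl over a mapped list (explicit-arguments version, for a higher-order rewrite)
theorem pvFoldlMap {α β γ : Type} (f : β → γ) (g : α → γ → α) (l : List β) (init : α) :
    (l.map f).foldl g init = l.foldl (fun x y => g x (f y)) init := by
  induction l generalizing init with
  | nil => rfl
  | cons d t ih => simp [ih]

-- A's pair fold, taken over the elements in the given order, yields r + p·Horner(reverse).
theorem pvPairFold (k : Int) (ys : List Int) : ∀ (r p : Int),
    ((ys.foldl (fun (s : Int × Int) d => (s.1 + d * s.2, s.2 * k)) (r, p)).1)
      = r + p * (ys.reverse.foldl (fun res d => res * k + d) 0) := by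
  induction ys with
  | nil => intro r p; simp
  | cons d t ih =>
      intro r p
      simp only [List.foldl_cons, List.reverse_cons, List.foldl_append, List.foldl_cons,
        List.foldl_nil, ih]
      ring

-- ===== VERDICT (by name: the statement is the Claim_ definition above) =====
theorem calculate_decimal_spec : Claim_equal_calculate_decimal := by
  intro tab k _
  show calculate_decimal tab k = calculate_decimal_alt tab k
  unfold calculate_decimal calculate_decimal_alt
  have hr : PySem.List.pyRange ((tab.length : Int) - 1) (-1) (-1)
      = (PySem.List.pyRange 0 (tab.length : Int) 1).reverse := by
    rw [PySem.List.pyRange_neg_one_eq_reverse]; norm_num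
  simp only [hr]
  rw [show (List.foldl (fun (s : Int × Int) i => (s.1 + PySem.List.pyGetD tab i 0 * s.2, s.2 * k)) (0, 1)
        ((PySem.List.pyRange 0 (tab.length : Int) 1).reverse))
      = List.foldl (fun (s : Int × Int) d => (s.1 + d * s.2, s.2 * k)) (0, 1)
        (((PySem.List.pyRange 0 (tab.length : Int) 1).reverse).map (fun i => PySem.List.pyGetD tab i 0))
      from (pvFoldlMap (fun i => PySem.List.pyGetD tab i 0) (fun (s : Int × Int) d => (s.1 + d * s.2, s.2 * k)) _ _).symm,
    List.map_reverse, PySem.List.map_pyGetD_pyRange_zero', pvPairFold]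
  simp
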